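-- pv_equiv track=rewrite | github.com/marabouboy/FLAME | FLAME/Archive/FLAME_FUNC_1-0.py | CORRECTADJMTXFUNC
-- ===== SOURCE A (Python) =====
-- def CORRECTADJMTXFUNC(CORRECTADJMTXINPUT, REF, EMPTYADJMTX):
--     #-----------Outside counters and variables-----------#
--     Flame_Rightadjmtx_EMPTYADJMTX = EMPTYADJMTX
--     Flame_Rightadjmtx_EXONNR = 0
--     Flame_Rightadjmtx_Counter1 = 0
--     Flame_Rightadjmtx_Counter2 = 0
--     Flame_Rightadjmtx_SPLICECOMB1 = ""
--     Flame_Rightadjmtx_SPLICECOMB2 = ""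
--     #-----------The Function Itself-----------#
--     for Flame_Rightadjmtx_COUNT1 in CORRECTADJMTXINPUT:
--         Flame_Rightadjmtx_EXONNR = (len(Flame_Rightadjmtx_COUNT1.split("-")[:-1])) #If one changes the "TMPSTRING" function, then one can avoid the use of this "Remove last element function"
--         for Flame_Rightadjmtx_COUNT2 in range(Flame_Rightadjmtx_EXONNR):
--             Flame_Rightadjmtx_SPLICECOMB1 = str(Flame_Rightadjmtx_COUNT1.split("-")[Flame_Rightadjmtx_COUNT2])
--             Flame_Rightadjmtx_SPLICECOMB2 = str(Flame_Rightadjmtx_COUNT1.split("-")[Flame_Rightadjmtx_COUNT2+1])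
--             Flame_Rightadjmtx_Counter1 = 0
--             Flame_Rightadjmtx_Counter2 = 0
--             for Flame_Rightadjmtx_COUNT2 in REF:
--                 if Flame_Rightadjmtx_SPLICECOMB1 == Flame_Rightadjmtx_COUNT2[0]:
--                     break
--                 elif Flame_Rightadjmtx_SPLICECOMB1 != Flame_Rightadjmtx_COUNT2[0]:
--                     Flame_Rightadjmtx_Counter1 += 1
--             for Flame_Rightadjmtx_COUNT2 in REF:
--                 if Flame_Rightadjmtx_SPLICECOMB2 == Flame_Rightadjmtx_COUNT2[0]:
--                     break
--                 elif Flame_Rightadjmtx_SPLICECOMB2 != Flame_Rightadjmtx_COUNT2[0]: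
--                     Flame_Rightadjmtx_Counter2 += 1
--             Flame_Rightadjmtx_EMPTYADJMTX[Flame_Rightadjmtx_Counter2][Flame_Rightadjmtx_Counter1] += 1
--     return Flame_Rightadjmtx_EMPTYADJMTX #Output Object Type: Nested List.
-- ===== SOURCE B (Python) =====
-- def CORRECTADJMTXFUNC(CORRECTADJMTXINPUT, REF, EMPTYADJMTX):
--     # Stage 1: map each REF label to its first index (missing labels -> len(REF)).
--     idx = {}
--     for i, row in enumerate(REF):
--         if row and row[0] not in idx:
--             idx[row[0]] = i
--     n = len(REF)
--     # Stage 2: collect every transition as one (row, col) index pair.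
--     keys = []
--     for line in CORRECTADJMTXINPUT:
--         parts = line.split("-")
--         for a, b in zip(parts, parts[1:]):
--             keys.append((idx.get(b, n), idx.get(a, n)))
--     # Stage 3: count identical transitions once.
--     cnt = {}
--     for k in keys:
--         cnt[k] = cnt.get(k, 0) + 1
--     # Stage 4: rebuild the matrix in a single comprehension (no cell-by-cell increments).
--     return [[v + cnt.get((i, j), 0) for j, v in enumerate(row)]
--             for i, row in enumerate(EMPTYADJMTX)]
-- ===== Notes on version B (the rewrite author's own statement) =====
-- stated objective: alternative
-- what changed: Instead of A's per-pair double linear scan of REF and cell-by-cell in-place increments, B stages the work: a label-to-first-index map built once, a single pass collecting all transitions as index pairs, a counting dict over those pairs, and a fresh result matrix built in one comprehension by adding each cell's count to the input matrix; it trades A's repeated REF scans for one full rebuild of the matrix (return value only; B does not mutate EMPTYADJMTX, A does).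
import Mathlib
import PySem

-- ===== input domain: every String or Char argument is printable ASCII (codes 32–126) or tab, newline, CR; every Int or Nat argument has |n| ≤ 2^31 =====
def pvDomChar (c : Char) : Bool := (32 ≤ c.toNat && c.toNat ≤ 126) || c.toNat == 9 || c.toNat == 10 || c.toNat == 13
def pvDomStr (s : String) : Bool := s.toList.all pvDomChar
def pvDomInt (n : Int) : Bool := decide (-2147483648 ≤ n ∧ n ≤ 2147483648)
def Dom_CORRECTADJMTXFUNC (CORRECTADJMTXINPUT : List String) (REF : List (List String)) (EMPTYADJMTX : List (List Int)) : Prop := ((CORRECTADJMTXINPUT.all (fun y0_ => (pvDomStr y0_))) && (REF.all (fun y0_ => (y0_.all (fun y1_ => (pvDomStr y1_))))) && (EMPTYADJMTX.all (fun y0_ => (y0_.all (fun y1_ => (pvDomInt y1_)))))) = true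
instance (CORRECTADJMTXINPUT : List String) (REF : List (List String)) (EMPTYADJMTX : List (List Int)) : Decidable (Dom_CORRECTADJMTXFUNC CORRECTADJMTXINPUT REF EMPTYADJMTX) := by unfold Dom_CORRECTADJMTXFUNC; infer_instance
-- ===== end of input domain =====

-- B stages the work instead of A's per-pair scans and in-place increments: a label→first-index
-- map over REF, one pass collecting all transitions as index pairs, a counting dict over those
-- pairs, and a fresh result matrix built by adding each cell's count (an alternative of similar
-- cost). A mutates EMPTYADJMTX in place, B does not: the equivalence proved is about the RETURN value.

-- ===== PORT A =====
-- the 'for COUNT2 in REF: if l == COUNT2[0]: break elif …: counter += 1' scan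
def aScan (l : String) : List (List String) → Nat
  | [] => 0
  | r :: rs =>
    match PySem.List.pyGet? r 0 with
    | none => 0              -- Python raises IndexError here; such inputs are outside Pre_
    | some h => if l = h then 0 else aScan l rs + 1

-- EMPTYADJMTX[i][j] += 1 (out-of-range = Python IndexError, outside Pre_; modify is then a no-op)
def incCell (m : List (List Int)) (i j : Nat) : List (List Int) :=
  m.modify i (fun row => row.modify j (· + 1))

def CORRECTADJMTXFUNC (CORRECTADJMTXINPUT : List String) (REF : List (List String)) (EMPTYADJMTX : List (List Int)) : List (List Int) :=
  CORRECTADJMTXINPUT.foldl (fun m s =>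
    let exonnr := (PySem.List.slice ((PySem.Str.split? s "-").getD []) none (some (-1))).length
    (PySem.List.pyRange 0 (exonnr : Int) 1).foldl (fun m2 i =>
      let c1 := aScan ((PySem.List.pyGet? ((PySem.Str.split? s "-").getD []) i).getD "") REF
      let c2 := aScan ((PySem.List.pyGet? ((PySem.Str.split? s "-").getD []) (i + 1)).getD "") REF
      incCell m2 c2 c1) m) EMPTYADJMTX

-- ===== PORT B =====
-- stage 1: each nonempty row's head label mapped to its first index in REF
def bIdx (REF : List (List String)) : PySem.Dict String Int :=
  (PySem.List.enumerate REF).foldl (fun d p =>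
    match p.2 with
    | [] => d
    | h :: _ => if d.contains h then d else d.insert h p.1) PySem.Dict.empty

-- stage 2: every transition as one (row, col) index pair
def bKeys (idx : PySem.Dict String Int) (n : Int) (CORRECTADJMTXINPUT : List String) : List (Int × Int) :=
  CORRECTADJMTXINPUT.foldl (fun acc line =>
    let parts := (PySem.Str.split? line "-").getD []
    (parts.zip parts.tail).foldl (fun acc2 ab =>
      acc2 ++ [(PySem.Dict.getD idx ab.2 n, PySem.Dict.getD idx ab.1 n)]) acc) []

def CORRECTADJMTXFUNC_alt (CORRECTADJMTXINPUT : List String) (REF : List (List String)) (EMPTYADJMTX : List (List Int)) : List (List Int) :=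
  let idx := bIdx REF
  let n : Int := PySem.List.len REF
  let keys := bKeys idx n CORRECTADJMTXINPUT
  -- stage 3: count identical transitions
  let cnt := keys.foldl (fun d k => d.insert k (d.getD k 0 + 1)) PySem.Dict.empty
  -- stage 4: rebuild the matrix, adding each cell's count
  (PySem.List.enumerate EMPTYADJMTX).map (fun p =>
    (PySem.List.enumerate p.2).map (fun q => q.2 + PySem.Dict.getD cnt (p.1, q.1) 0))

-- ===== PRECONDITION & SPEC =====
-- Pre_ = exactly the inputs on which the Python A raises no exception: for each adjacent pair of
-- '-'-separated parts, every REF row before the first row whose head equals the label is nonempty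
-- (A reads row[0] of each row it scans), and the two resulting first-match indices (= len(REF)
-- when the label matches no row head) address an existing cell of EMPTYADJMTX.
def Pre_CORRECTADJMTXFUNC (CORRECTADJMTXINPUT : List String) (REF : List (List String)) (EMPTYADJMTX : List (List Int)) : Prop :=
  ∀ s ∈ CORRECTADJMTXINPUT,
    ∀ p ∈ (let parts := (PySem.Str.split? s "-").getD []; parts.zip parts.tail),
      (∀ r ∈ REF.take (REF.findIdx (fun r => r.head? == some p.1)), r ≠ []) ∧
      (∀ r ∈ REF.take (REF.findIdx (fun r => r.head? == some p.2)), r ≠ []) ∧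
      REF.findIdx (fun r => r.head? == some p.2) < EMPTYADJMTX.length ∧
      REF.findIdx (fun r => r.head? == some p.1) <
        (EMPTYADJMTX.getD (REF.findIdx (fun r => r.head? == some p.2)) []).length
instance (CORRECTADJMTXINPUT : List String) (REF : List (List String)) (EMPTYADJMTX : List (List Int)) : Decidable (Pre_CORRECTADJMTXFUNC CORRECTADJMTXINPUT REF EMPTYADJMTX) := by unfold Pre_CORRECTADJMTXFUNC; infer_instance

def pvWitness_CORRECTADJMTXFUNC : List String × List (List String) × List (List Int) :=
  (["a-b", "b-a-a"], [["a", "x"], ["b"]], [[0, 0], [0, 0]])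

def Spec_CORRECTADJMTXFUNC (CORRECTADJMTXINPUT : List String) (REF : List (List String)) (EMPTYADJMTX : List (List Int)) (out : List (List Int)) : Prop := out = CORRECTADJMTXFUNC_alt CORRECTADJMTXINPUT REF EMPTYADJMTX
instance (CORRECTADJMTXINPUT : List String) (REF : List (List String)) (EMPTYADJMTX : List (List Int)) (out : List (List Int)) : Decidable (Spec_CORRECTADJMTXFUNC CORRECTADJMTXINPUT REF EMPTYADJMTX out) := by unfold Spec_CORRECTADJMTXFUNC; infer_instance

-- ===== CLAIM (what is proved, stated in full; the proofs are below) =====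
def Claim_equal_CORRECTADJMTXFUNC : Prop := ∀ (CORRECTADJMTXINPUT : List String) (REF : List (List String)) (EMPTYADJMTX : List (List Int)), Dom_CORRECTADJMTXFUNC CORRECTADJMTXINPUT REF EMPTYADJMTX → Pre_CORRECTADJMTXFUNC CORRECTADJMTXINPUT REF EMPTYADJMTX → Spec_CORRECTADJMTXFUNC CORRECTADJMTXINPUT REF EMPTYADJMTX (CORRECTADJMTXFUNC CORRECTADJMTXINPUT REF EMPTYADJMTX)

-- ===== LEMMAS AND PROOFS =====

-- proof-side loop invariants: A's scan as a Bool/Nat recursion, bridged to Pre_'s findIdx form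
def scanOK (l : String) : List (List String) → Bool
  | [] => true
  | [] :: _ => false
  | (h :: _) :: rs => if l = h then true else scanOK l rs

def preIdx (l : String) : List (List String) → Nat
  | [] => 0
  | r :: rs => if r.head? = some l then 0 else preIdx l rs + 1

theorem scanOK_iff (l : String) (REF : List (List String)) :
    scanOK l REF = true ↔
      ∀ r ∈ REF.take (REF.findIdx (fun r => r.head? == some l)), r ≠ [] := by
  induction REF with
  | nil => simp [scanOK]
  | cons r rs ih =>
    cases r with
    | nil => simp [scanOK, List.findIdx_cons]
    | cons x xs =>
      by_cases hx : l = x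
      · subst hx; simp [scanOK, List.findIdx_cons]
      · have hxl : ¬ x = l := fun he => hx he.symm
        have hb : (x == l) = false := by simpa using hxl
        simp [scanOK, hx, List.findIdx_cons, hb, ih]

-- Under a successful scan, A's counter is the first-head index.
theorem aScan_eq_preIdx (l : String) (REF : List (List String)) (h : scanOK l REF = true) :
    aScan l REF = preIdx l REF := by
  induction REF with
  | nil => rfl
  | cons r rs ih =>
    cases r with
    | nil => simp [scanOK] at h
    | cons x xs =>
      by_cases hx : l = x
      · subst hx; simp [aScan, preIdx]
      · have h' : scanOK l rs = true := by simpa [scanOK, hx] using h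
        have hxl : ¬ x = l := fun he => hx he.symm
        simp [aScan, preIdx, hx, hxl, ih h']

def foundB (l : String) (REF : List (List String)) : Bool :=
  REF.any (fun r => r.head? = some l)

theorem preIdx_of_not_found (l : String) (REF : List (List String)) (h : foundB l REF = false) :
    preIdx l REF = REF.length := by
  induction REF with
  | nil => rfl
  | cons r rs ih =>
    simp [foundB] at h
    have h2 : foundB l rs = false := by simp [foundB]; exact h.2
    simp [preIdx, h.1, ih h2]

-- B's dict-building step never overwrites an existing key.
theorem bIdx_loop_preserves (L : List (List String)) :
    ∀ (s : Int) (d : PySem.Dict String Int) (l : String) (v : Int), d.get? l = some v →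
    ((PySem.List.enumerate L s).foldl (fun d p =>
      match p.2 with
      | [] => d
      | h :: _ => if d.contains h then d else d.insert h p.1) d).get? l = some v := by
  induction L with
  | nil => intro s d l v h; simpa [PySem.List.enumerate_nil]
  | cons r rs ih =>
    intro s d l v h
    rw [PySem.List.enumerate_cons]
    simp only [List.foldl_cons]
    cases r with
    | nil => exact ih (s + 1) d l v h
    | cons x xs =>
      dsimp only
      cases hc : d.contains x with
      | true => rw [if_pos rfl]; exact ih (s + 1) d l v h
      | false =>
        have hlx : l ≠ x := by
          intro he; subst he
          rw [PySem.Dict.contains_eq_isSome_get?, h] at hc; simp at hc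
        rw [if_neg (by simp)]
        exact ih (s + 1) _ l v (by rw [PySem.Dict.get?_insert_of_ne d s hlx]; exact h)

-- Characterisation of B's dict lookup along a successful scan.
theorem bIdx_loop_get? (l : String) : ∀ (L : List (List String)) (s : Int)
    (d : PySem.Dict String Int), scanOK l L = true → d.get? l = none →
    ((PySem.List.enumerate L s).foldl (fun d p =>
      match p.2 with
      | [] => d
      | h :: _ => if d.contains h then d else d.insert h p.1) d).get? l
      = if foundB l L then some (s + (preIdx l L : Int)) else none := by
  intro L
  induction L with
  | nil => intro s d _ hd; simpa [PySem.List.enumerate_nil, foundB]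
  | cons r rs ih =>
    intro s d hok hd
    rw [PySem.List.enumerate_cons]
    simp only [List.foldl_cons]
    cases r with
    | nil => simp [scanOK] at hok
    | cons x xs =>
      dsimp only
      by_cases hx : l = x
      · subst hx
        have hc : d.contains l = false := by
          rw [PySem.Dict.contains_eq_isSome_get?, hd]; rfl
        rw [if_neg (by simp [hc])]
        rw [bIdx_loop_preserves rs (s + 1) _ l s (PySem.Dict.get?_insert_self d l s)]
        simp [foundB, preIdx]
      · have hok' : scanOK l rs = true := by simpa [scanOK, hx] using hok
        have hxl : ¬ x = l := fun he => hx he.symm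
        have hhead : ¬ ((x :: xs).head? = some l) := by simpa using hxl
        have hgoal : (if foundB l rs then some ((s + 1) + (preIdx l rs : Int)) else none)
            = if foundB l ((x :: xs) :: rs) then some (s + (preIdx l ((x :: xs) :: rs) : Int)) else none := by
          have hfeq : foundB l ((x :: xs) :: rs) = foundB l rs := by
            simp [foundB, hxl]
          have hpeq : preIdx l ((x :: xs) :: rs) = preIdx l rs + 1 := by
            simp [preIdx, hxl]
          rw [hfeq, hpeq]
          by_cases hf : foundB l rs = true
          · rw [if_pos hf, if_pos hf]; congr 1; push_cast; ring
          · rw [if_neg hf, if_neg hf]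
        cases hc : d.contains x with
        | true => rw [if_pos rfl, ih (s + 1) d hok' hd]; exact hgoal
        | false =>
          have hd' : (d.insert x s).get? l = none := by
            rw [PySem.Dict.get?_insert_of_ne d s hx]; exact hd
          rw [if_neg (by simp), ih (s + 1) _ hok' hd']
          exact hgoal

-- B's first-index lookup equals A's counter index (Int form, default len REF).
theorem bIdx_getD_int (l : String) (REF : List (List String)) (h : scanOK l REF = true) :
    PySem.Dict.getD (bIdx REF) l (PySem.List.len REF) = (preIdx l REF : Int) := by
  have hchar := bIdx_loop_get? l REF 0 PySem.Dict.empty h (PySem.Dict.get?_empty l)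
  unfold bIdx
  rw [PySem.Dict.getD_eq_get?_getD, hchar]
  by_cases hf : foundB l REF = true
  · rw [if_pos hf]; simp
  · rw [if_neg hf]
    simp only [Option.getD_none, PySem.List.len_eq]
    rw [preIdx_of_not_found l REF (by simpa using hf)]

-- A's indexed loop over range(len(parts[:-1])) is a loop over zip(parts, parts[1:]) (Nat form).
theorem range_pairs_nat {M : Type} : ∀ (parts : List String) (g : M → String → String → M) (m : M),
    (List.range (parts.length - 1)).foldl
      (fun m2 j => g m2 (parts.getD j "") (parts.getD (j + 1) "")) m
    = (parts.zip parts.tail).foldl (fun m2 ab => g m2 ab.1 ab.2) m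
  | [], _, _ => rfl
  | [_], _, _ => rfl
  | x :: y :: t', g, m => by
    have hlen : (x :: y :: t').length - 1 = ((y :: t').length - 1) + 1 := by simp
    rw [hlen, List.range_succ_eq_map, List.foldl_cons, List.foldl_map]
    simp only [List.getD_cons_zero, List.getD_cons_succ, Nat.succ_eq_add_one]
    rw [show ((x :: y :: t').zip (x :: y :: t').tail)
        = (x, y) :: ((y :: t').zip (y :: t').tail) from rfl, List.foldl_cons]
    exact range_pairs_nat (y :: t') g (g m x y)

-- the same, in A's Int-indexed form
theorem range_pairs {M : Type} (parts : List String) (g : M → String → String → M) (m : M) :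
    (PySem.List.pyRange 0 (((PySem.List.slice parts none (some (-1))).length : Nat) : Int) 1).foldl
      (fun m2 i => g m2 ((PySem.List.pyGet? parts i).getD "")
        ((PySem.List.pyGet? parts (i + 1)).getD "")) m
    = (parts.zip parts.tail).foldl (fun m2 ab => g m2 ab.1 ab.2) m := by
  rw [PySem.List.slice_to_neg_one, PySem.List.pyRange_zero_nat, List.foldl_map]
  have hb : ∀ (m2 : M) (j : Nat), j ∈ List.range parts.dropLast.length →
      g m2 ((PySem.List.pyGet? parts ((j : Nat) : Int)).getD "")
        ((PySem.List.pyGet? parts (((j : Nat) : Int) + 1)).getD "")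
      = g m2 (parts.getD j "") (parts.getD (j + 1) "") := by
    intro m2 j _
    have e : ((j : Nat) : Int) + 1 = ((j + 1 : Nat) : Int) := by push_cast; ring
    rw [e, PySem.List.pyGet?_natCast, PySem.List.pyGet?_natCast]
    simp only [List.getD_eq_getElem?_getD]
  rw [PySem.List.foldl_congr_mem _ _ _ _ (fun acc j hj => hb acc j hj)]
  rw [List.length_dropLast]
  exact range_pairs_nat parts g m

-- range_pairs specialised to A's loop body, so that `rw` matches the goal literally
theorem range_pairs_spec (REF : List (List String)) (parts : List String) (m : List (List Int)) :
    (PySem.List.pyRange 0 (((PySem.List.slice parts none (some (-1))).length : Nat) : Int) 1).foldl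
      (fun m2 i => incCell m2 (aScan ((PySem.List.pyGet? parts (i + 1)).getD "") REF)
        (aScan ((PySem.List.pyGet? parts i).getD "") REF)) m
    = (parts.zip parts.tail).foldl
        (fun m2 ab => incCell m2 (aScan ab.2 REF) (aScan ab.1 REF)) m :=
  range_pairs parts (fun m2 a b => incCell m2 (aScan b REF) (aScan a REF)) m

-- shape and entries of a single increment (getD form: no dependent index proofs)
theorem incCell_length (m : List (List Int)) (i j : Nat) : (incCell m i j).length = m.length := by
  simp [incCell]

theorem incCell_row (m : List (List Int)) (i j a : Nat) :
    (incCell m i j).getD a [] = if i = a then (m.getD a []).modify j (· + 1) else m.getD a [] := by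
  simp only [incCell, List.getD_eq_getElem?_getD, List.getElem?_modify]
  cases h : m[a]? <;> by_cases hia : i = a <;> simp [hia]

-- shape and entries of the whole increment fold
theorem foldl_inc_length : ∀ (P : List (Nat × Nat)) (m : List (List Int)),
    (P.foldl (fun m p => incCell m p.1 p.2) m).length = m.length
  | [], _ => rfl
  | p :: P, m => by
    rw [List.foldl_cons, foldl_inc_length P, incCell_length]

theorem foldl_inc_row : ∀ (P : List (Nat × Nat)) (m : List (List Int)) (a : Nat),
    ((P.foldl (fun m p => incCell m p.1 p.2) m).getD a []).length = (m.getD a []).length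
  | [], _, _ => rfl
  | p :: P, m, a => by
    rw [List.foldl_cons, foldl_inc_row P, incCell_row]
    split <;> simp

theorem foldl_inc_cell : ∀ (P : List (Nat × Nat)) (m : List (List Int)) (a b : Nat),
    b < (m.getD a []).length →
    ((P.foldl (fun m p => incCell m p.1 p.2) m).getD a []).getD b 0
      = (m.getD a []).getD b 0 + (P.count (a, b) : Int)
  | [], _, _, _, _ => by simp
  | p :: P, m, a, b, hb => by
    rw [List.foldl_cons]
    have hb' : b < ((incCell m p.1 p.2).getD a []).length := by
      rw [incCell_row]; split <;> simpa using hb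
    rw [foldl_inc_cell P _ a b hb']
    have hstep : ((incCell m p.1 p.2).getD a []).getD b 0
        = (m.getD a []).getD b 0 + (if p = (a, b) then (1 : Int) else 0) := by
      rw [incCell_row]
      by_cases h1 : p.1 = a
      · rw [if_pos h1, List.getD_eq_getElem?_getD, List.getElem?_modify]
        have hrb : (m.getD a [])[b]? = some ((m.getD a []).getD b 0) := by
          rw [List.getElem?_eq_getElem hb, List.getD_eq_getElem _ _ hb]
        rw [hrb]
        by_cases h2 : p.2 = b
        · have hp : p = (a, b) := Prod.ext h1 h2
          simp [hp]
        · have hp : p ≠ (a, b) := fun he => h2 (by rw [he])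
          simp [h2, hp]
      · have hp : p ≠ (a, b) := fun he => h1 (by rw [he])
        simp [h1, hp]
    rw [hstep, List.count_cons]
    rcases eq_or_ne p (a, b) with h | h
    · subst h
      simp only [beq_self_eq_true, if_true]
      push_cast; ring
    · have hbeq : (p == (a, b)) = false := beq_eq_false_iff_ne.mpr h
      simp only [if_neg h, hbeq, Bool.false_eq_true, if_false]
      push_cast; ring

-- B's key-collecting loop is a flatMap.
theorem bKeys_eq_flatMap (idx : PySem.Dict String Int) (n : Int) (input : List String) :
    bKeys idx n input = input.flatMap (fun line =>
      (let parts := (PySem.Str.split? line "-").getD []; parts.zip parts.tail).map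
        (fun ab => (PySem.Dict.getD idx ab.2 n, PySem.Dict.getD idx ab.1 n))) := by
  unfold bKeys
  have hinner : ∀ (acc : List (Int × Int)) (line : String), line ∈ input →
      (let parts := (PySem.Str.split? line "-").getD [];
        (parts.zip parts.tail).foldl (fun acc2 ab =>
          acc2 ++ [(PySem.Dict.getD idx ab.2 n, PySem.Dict.getD idx ab.1 n)]) acc)
      = acc ++ (let parts := (PySem.Str.split? line "-").getD []; parts.zip parts.tail).map
          (fun ab => (PySem.Dict.getD idx ab.2 n, PySem.Dict.getD idx ab.1 n)) := by
    intro acc line _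
    exact PySem.List.foldl_append_singleton_eq_map _ _ _
  rw [PySem.List.foldl_congr_mem _ _ _ _ hinner]
  exact PySem.List.foldl_append_eq_flatMap _ _ _

-- casting Nat pairs into Int pairs is injective
theorem natPair_inj : Function.Injective (fun p : Nat × Nat => ((p.1 : Int), (p.2 : Int))) := by
  intro p q h
  simp only [Prod.mk.injEq, Int.natCast_inj] at h
  exact Prod.ext h.1 h.2

-- ===== VERDICT (by name: the statement is the Claim_ definition above) =====
theorem CORRECTADJMTXFUNC_spec : Claim_equal_CORRECTADJMTXFUNC := by
  intro input REF mtx _hdom hpre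
  unfold Spec_CORRECTADJMTXFUNC CORRECTADJMTXFUNC CORRECTADJMTXFUNC_alt
  -- the Nat index-pair list both sides count
  set pairsOf := fun s : String =>
    (let parts := (PySem.Str.split? s "-").getD []; parts.zip parts.tail) with hpairsOf
  set PA : List (Nat × Nat) := input.flatMap (fun s =>
    (pairsOf s).map (fun ab => (preIdx ab.2 REF, preIdx ab.1 REF))) with hPA
  -- A's side equals the increment fold over PA
  have hAside : input.foldl (fun m s =>
      (PySem.List.pyRange 0 (((PySem.List.slice ((PySem.Str.split? s "-").getD []) none (some (-1))).length : Nat) : Int) 1).foldl (fun m2 i =>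
        incCell m2 (aScan ((PySem.List.pyGet? ((PySem.Str.split? s "-").getD []) (i + 1)).getD "") REF)
          (aScan ((PySem.List.pyGet? ((PySem.Str.split? s "-").getD []) i).getD "") REF)) m) mtx
      = PA.foldl (fun m p => incCell m p.1 p.2) mtx := by
    have h1 : ∀ (m : List (List Int)) (s : String), s ∈ input →
        (PySem.List.pyRange 0 (((PySem.List.slice ((PySem.Str.split? s "-").getD []) none (some (-1))).length : Nat) : Int) 1).foldl (fun m2 i =>
          incCell m2 (aScan ((PySem.List.pyGet? ((PySem.Str.split? s "-").getD []) (i + 1)).getD "") REF)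
            (aScan ((PySem.List.pyGet? ((PySem.Str.split? s "-").getD []) i).getD "") REF)) m
        = ((pairsOf s).map (fun ab => (preIdx ab.2 REF, preIdx ab.1 REF))).foldl
            (fun m p => incCell m p.1 p.2) m := by
      intro m s hs
      rw [range_pairs_spec REF ((PySem.Str.split? s "-").getD []) m, List.foldl_map]
      refine PySem.List.foldl_congr_mem _ _ _ _ ?_
      intro m2 ab hab
      obtain ⟨h1, h2, -, -⟩ := hpre s hs ab hab
      rw [aScan_eq_preIdx _ _ ((scanOK_iff ab.1 REF).mpr h1),
        aScan_eq_preIdx _ _ ((scanOK_iff ab.2 REF).mpr h2)]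
    rw [PySem.List.foldl_congr_mem _ _ _ _ h1, hPA, List.flatMap_def, List.foldl_flatten,
      List.foldl_map]
  rw [hAside]
  -- B's key list is PA cast to Int pairs
  have hKeys : bKeys (bIdx REF) (PySem.List.len REF) input
      = PA.map (fun p => ((p.1 : Int), (p.2 : Int))) := by
    rw [bKeys_eq_flatMap, hPA, List.map_flatMap]
    refine List.flatMap_congr ?_
    intro s hs
    rw [List.map_map]
    refine List.map_congr_left ?_
    intro ab hab
    obtain ⟨h1, h2, -, -⟩ := hpre s hs ab hab
    rw [Function.comp_apply]
    rw [bIdx_getD_int _ _ ((scanOK_iff ab.1 REF).mpr h1),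
      bIdx_getD_int _ _ ((scanOK_iff ab.2 REF).mpr h2)]
  -- compare entry by entry
  refine List.ext_getElem ?_ ?_
  · simp [foldl_inc_length, PySem.List.length_enumerate]
  · intro a ha1 ha2
    have hma : a < mtx.length := by simpa [foldl_inc_length] using ha1
    have henum : (PySem.List.enumerate mtx 0)[a]'(by simpa [PySem.List.length_enumerate] using hma)
        = ((0 : Int) + a, mtx[a]'hma) := PySem.List.getElem_enumerate ..
    rw [List.getElem_map]
    simp only [henum]
    rw [← List.getD_eq_getElem _ [] ha1]
    refine List.ext_getElem ?_ ?_
    · rw [foldl_inc_row, List.getD_eq_getElem _ [] hma]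
      simp [PySem.List.length_enumerate]
    · intro b hb1 hb2
      have hb1' : b < ((PA.foldl (fun m p => incCell m p.1 p.2) mtx).getD a []).length := by
        simpa [List.getD_eq_getElem?_getD] using hb1
      have hmb : b < (mtx.getD a []).length := foldl_inc_row PA mtx a ▸ hb1' 
      have hmb' : b < (mtx[a]'hma).length := by rwa [List.getD_eq_getElem _ [] hma] at hmb
      have henum2 : (PySem.List.enumerate (mtx[a]'hma) 0)[b]'(by simpa [PySem.List.length_enumerate] using hmb')
          = ((0 : Int) + b, (mtx[a]'hma)[b]'hmb') := PySem.List.getElem_enumerate ..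
      rw [List.getElem_map]
      simp only [henum2]
      rw [← List.getD_eq_getElem _ (0 : Int) hb1, foldl_inc_cell PA mtx a b hmb]
      have hmtx : (mtx.getD a []).getD b 0 = (mtx[a]'hma)[b]'hmb' := by
        rw [List.getD_eq_getElem _ [] hma, List.getD_eq_getElem _ (0 : Int) hmb']
      rw [hmtx, hKeys]
      have hcnt : ((PA.map (fun p => ((p.1 : Int), (p.2 : Int)))).foldl
            (fun d k => d.insert k (d.getD k 0 + 1)) PySem.Dict.empty).getD
            ((0 : Int) + a, (0 : Int) + b) 0
          = ((PA.map (fun p => ((p.1 : Int), (p.2 : Int)))).count ((a : Int), (b : Int)) : Int) := by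
        rw [show ((0 : Int) + a, (0 : Int) + b) = ((a : Int), (b : Int)) by simp]
        rw [PySem.Dict.getD_foldl_insert_add_one]
        simp
      rw [hcnt, List.count_map_of_injective PA _ natPair_inj (a, b)]
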